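-- pv_equiv track=rewrite | github.com/hissue/Program-Solution | 프로그래머스/lv0/120843. 공 던지기/공 던지기.py | solution
-- ===== SOURCE A (Python) =====
-- def solution(numbers, k):
--     answer = 0
--     count = 0
--     length = len(numbers)
--     while count != k-1:
--         count+=1
--         answer = (answer+2)%length
--     return answer+1
-- ===== SOURCE B (Python) =====
-- def solution(numbers, k):
--     return (2 * (k - 1)) % len(numbers) + 1
-- ===== Notes on version B (the rewrite author's own statement) =====
-- stated objective: faster
-- what changed: replaced the k-1-step simulation loop by the closed-form modular expression (2*(k-1)) % len(numbers) + 1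
-- outside the precondition, e.g. on solution([], 1): A returns 1, B raises ZeroDivisionError
import Mathlib
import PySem

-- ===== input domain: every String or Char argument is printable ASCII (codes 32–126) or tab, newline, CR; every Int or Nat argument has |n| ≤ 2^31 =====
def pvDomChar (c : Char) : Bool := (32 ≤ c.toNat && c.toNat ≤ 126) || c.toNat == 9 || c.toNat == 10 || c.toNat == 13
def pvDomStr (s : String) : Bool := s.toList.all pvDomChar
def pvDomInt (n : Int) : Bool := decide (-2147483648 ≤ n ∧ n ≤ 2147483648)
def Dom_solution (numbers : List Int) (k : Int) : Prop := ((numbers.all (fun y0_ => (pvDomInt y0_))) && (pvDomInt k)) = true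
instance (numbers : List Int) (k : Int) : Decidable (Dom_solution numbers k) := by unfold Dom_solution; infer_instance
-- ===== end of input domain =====

-- B replaces A's k-1-step simulation loop by the closed form (2*(k-1)) % len(numbers) + 1.


-- ===== PORT A =====
-- the while loop, run with fuel = number of remaining iterations (k-1-count);
-- the guard 'count != k-1' is kept literally
def solLoop (length k : Int) : Nat → Int → Int → Int
  | 0, answer, _ => answer
  | n+1, answer, count =>
      if count ≠ k - 1 then
        solLoop length k n (PySem.Int.mod (answer + 2) length) (count + 1)
      else answer

def solution (numbers : List Int) (k : Int) : Int :=
  solLoop (numbers.length : Int) k (k - 1).toNat 0 0 + 1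

-- ===== PORT B =====
def solution_alt (numbers : List Int) (k : Int) : Int :=
  PySem.Int.mod (2 * (k - 1)) (numbers.length : Int) + 1

-- ===== PRECONDITION & SPEC =====
-- Pre_ excludes k < 1 (A's while loop never terminates) and empty numbers
-- (A raises ZeroDivisionError for k ≥ 2; for k = 1 A returns 1 but B's modulo itself raises).
def Pre_solution (numbers : List Int) (k : Int) : Prop := 1 ≤ k ∧ numbers ≠ []
instance (numbers : List Int) (k : Int) : Decidable (Pre_solution numbers k) := by
  unfold Pre_solution; infer_instance

def pvWitness_solution : List Int × Int := ([3, 1, 4], 5)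

def Spec_solution (numbers : List Int) (k : Int) (out : Int) : Prop := out = solution_alt numbers k
instance (numbers : List Int) (k : Int) (out : Int) : Decidable (Spec_solution numbers k out) := by
  unfold Spec_solution; infer_instance

-- ===== CLAIM (what is proved, stated in full; the proofs are below) =====
def Claim_equal_solution : Prop := ∀ (numbers : List Int) (k : Int), Dom_solution numbers k → Pre_solution numbers k → Spec_solution numbers k (solution numbers k)

-- ===== LEMMAS AND PROOFS =====

-- running the loop with n remaining iterations from count = k-1-n accumulates 2*n mod L
theorem solLoop_closed (L k : Int) (hL : 0 < L) :
    ∀ (n : Nat) (a : Int), solLoop L k n a (k - 1 - n) =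
      if n = 0 then a else PySem.Int.mod (a + 2 * n) L := by
  intro n
  induction n with
  | zero => intro a; simp [solLoop]
  | succ m ih =>
    intro a
    have hne : k - 1 - ((m : Int) + 1) ≠ k - 1 := by omega
    have hstep : k - 1 - ((m + 1 : Nat) : Int) = k - 1 - ((m : Int) + 1) := by push_cast; ring
    rw [hstep]
    simp only [solLoop, hne, ne_eq, not_false_iff, if_true]
    have harg : k - 1 - ((m : Int) + 1) + 1 = k - 1 - (m : Int) := by ring
    rw [harg, ih (PySem.Int.mod (a + 2) L)]
    by_cases hm : m = 0
    · subst hm; simp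
    · simp only [hm, Nat.succ_ne_zero, if_false]
      simp only [PySem.Int.mod_eq_emod_of_pos hL]
      have : a + 2 * ((m + 1 : Nat) : Int) = (a + 2) + 2 * (m : Int) := by push_cast; ring
      rw [this, Int.emod_add_emod]

-- ===== VERDICT (by name: the statement is the Claim_ definition above) =====
theorem solution_spec : Claim_equal_solution := by
  intro numbers k _ hpre
  obtain ⟨hk, hne⟩ := hpre
  have hL : 0 < (numbers.length : Int) := by
    have : numbers.length ≠ 0 := by simpa using List.length_pos_iff.mpr hne |>.ne'
    omega
  unfold Spec_solution solution solution_alt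
  have hrun := solLoop_closed (numbers.length : Int) k hL (k - 1).toNat 0
  rw [show k - 1 - (((k - 1).toNat : Int)) = 0 from by omega] at hrun
  rw [hrun]
  by_cases h1 : (k - 1).toNat = 0
  · have hk1 : k = 1 := by omega
    subst hk1
    rw [if_pos h1, PySem.Int.mod_eq_emod_of_pos hL]
    norm_num
  · rw [if_neg h1]
    have hcast : ((k - 1).toNat : Int) = k - 1 := by omega
    rw [hcast]
    norm_num
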